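-- pv_equiv track=rewrite | github.com/danwalsh1/Ultimate-Ultimate-Tic-Tac-Toe | uTTTGetButtonPos.py | getBtnAddrL1
-- ===== SOURCE A (Python) =====
-- def getBtnAddrL1(row, column):
--     while(row > 2):
--         row -= 3
--     while(column > 2):
--         column -= 3
--
--     if(row == 0):
--         if(column == 0):
--             return 0
--         elif(column == 1):
--             return 1
--         else:
--             return 2
--     elif(row == 1):
--         if(column == 0):
--             return 3
--         elif(column == 1):
--             return 4
--         else:
--             return 5
--     else:
--         if(column == 0):
--             return 6
--         elif(column == 1):
--             return 7
--         else:
--             return 8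
-- ===== SOURCE B (Python) =====
-- def getBtnAddrL1(row, column):
--     # O(1): replace A's subtraction loops with a single modulo, and the
--     # 9-way nested if with an additive base+offset decomposition.
--     r = row % 3 if row > 2 else row
--     c = column % 3 if column > 2 else column
--     base = 0 if r == 0 else (3 if r == 1 else 6)
--     off = 0 if c == 0 else (1 if c == 1 else 2)
--     return base + off
-- ===== Notes on version B (the rewrite author's own statement) =====
-- stated objective: faster
-- what changed: Replaces A's two subtract-3-until-<=2 loops with a single conditional modulo and the 9-way nested if/elif tree with an additive base+offset decomposition.
import Mathlib
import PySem

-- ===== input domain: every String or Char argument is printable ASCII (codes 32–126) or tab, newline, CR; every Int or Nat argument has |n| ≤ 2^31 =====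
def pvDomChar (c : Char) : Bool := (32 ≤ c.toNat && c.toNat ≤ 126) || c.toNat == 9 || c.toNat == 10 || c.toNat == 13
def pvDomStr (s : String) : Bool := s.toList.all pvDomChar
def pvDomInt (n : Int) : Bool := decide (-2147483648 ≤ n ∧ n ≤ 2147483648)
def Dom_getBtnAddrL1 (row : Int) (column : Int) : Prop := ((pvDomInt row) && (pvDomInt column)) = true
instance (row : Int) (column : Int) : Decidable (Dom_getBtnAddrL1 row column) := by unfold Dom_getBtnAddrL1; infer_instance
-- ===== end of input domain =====

-- B replaces A's subtract-3 loops by a conditional modulo and the nested if tree by a base+offset sum: O(1) instead of O(row+column).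


-- ===== PORT A =====
-- A's 'while x > 2: x -= 3' loop, as structural recursion
def pvReduceA (x : Int) : Int :=
  if x > 2 then pvReduceA (x - 3) else x
termination_by (x - 2).toNat
decreasing_by omega

def getBtnAddrL1 (row : Int) (column : Int) : Int :=
  let r := pvReduceA row
  let c := pvReduceA column
  if r = 0 then
    (if c = 0 then 0 else if c = 1 then 1 else 2)
  else if r = 1 then
    (if c = 0 then 3 else if c = 1 then 4 else 5)
  else
    (if c = 0 then 6 else if c = 1 then 7 else 8)

-- ===== PORT B =====
def getBtnAddrL1_alt (row : Int) (column : Int) : Int :=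
  let r := if row > 2 then PySem.Int.mod row 3 else row
  let c := if column > 2 then PySem.Int.mod column 3 else column
  let base := if r = 0 then 0 else if r = 1 then 3 else 6
  let off := if c = 0 then 0 else if c = 1 then 1 else 2
  base + off

-- ===== PRECONDITION & SPEC =====
def Spec_getBtnAddrL1 (row : Int) (column : Int) (out : Int) : Prop := out = getBtnAddrL1_alt row column
instance (row : Int) (column : Int) (out : Int) : Decidable (Spec_getBtnAddrL1 row column out) := by unfold Spec_getBtnAddrL1; infer_instance

-- ===== CLAIM (what is proved, stated in full; the proofs are below) =====
def Claim_equal_getBtnAddrL1 : Prop := ∀ (row : Int) (column : Int), Dom_getBtnAddrL1 row column → Spec_getBtnAddrL1 row column (getBtnAddrL1 row column)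

-- ===== LEMMAS AND PROOFS =====

-- A's loop computes B's conditional modulo
theorem pvReduceA_eq (x : Int) : pvReduceA x = if x > 2 then PySem.Int.mod x 3 else x := by
  induction x using pvReduceA.induct with
  | case1 x h ih =>
    rw [pvReduceA]
    simp only [h, if_pos]
    rw [ih, PySem.Int.mod_eq_emod_of_pos (b := 3) (by norm_num),
       PySem.Int.mod_eq_emod_of_pos (b := 3) (by norm_num)]
    split_ifs <;> omega
  | case2 x h =>
    rw [pvReduceA]
    simp [h]

-- ===== VERDICT (by name: the statement is the Claim_ definition above) =====
theorem getBtnAddrL1_spec : Claim_equal_getBtnAddrL1 := by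
  intro row column _
  unfold Spec_getBtnAddrL1 getBtnAddrL1 getBtnAddrL1_alt
  rw [pvReduceA_eq, pvReduceA_eq]
  dsimp only
  have hr : 0 ≤ PySem.Int.mod row 3 ∧ PySem.Int.mod row 3 < 3 :=
    ⟨PySem.Int.mod_nonneg row (by norm_num), PySem.Int.mod_lt row (by norm_num)⟩
  have hc : 0 ≤ PySem.Int.mod column 3 ∧ PySem.Int.mod column 3 < 3 :=
    ⟨PySem.Int.mod_nonneg column (by norm_num), PySem.Int.mod_lt column (by norm_num)⟩
  split_ifs <;> omega
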